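-- pv_equiv track=rewrite | github.com/ahyun39/Engineer | Projects/Intern/Law_data_analysis_RAG/data_chunking_logic.py | add_idx
-- ===== SOURCE A (Python) =====
-- from collections import defaultdict
--
-- def add_idx(data):
--     # columns : ['doc_id' , 'url', 'chunk_id', 'chunk_title', 'chunk_content', 'sentence_split']
--     title_index, title_counts, doc_index = defaultdict(int), defaultdict(int), defaultdict(int)
--
--     for item in data:
--         title_counts[item[0] + item[3]] += 1
--
--     for item in data:
--         doc_id, chunk_title = item[0], item[3]
--         doc_chunk_title = doc_id + chunk_title
--
--         title_index[doc_chunk_title] += 1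
--         index = title_index[doc_chunk_title]
--         total_count = title_counts[doc_chunk_title]  # 같은 chunk_title을 가진 문서 전체 개수
--
--         doc_index[doc_id] += 1
--         item[2] = f"{doc_id}_{doc_index[doc_id]:04}"  # chunk_idx
--
--         if total_count > 1:
--             item[3] = f"{chunk_title} {index}/{total_count}"  # chunk_title
--             index += 1
--
--     return data
-- ===== SOURCE B (Python) =====
-- from collections import defaultdict
--
-- def add_idx(data):
--     # Grouping re-implementation: bucket row indices by doc and by doc+title once,
--     # then number each bucket; builds a fresh output (does not mutate its argument).
--     out = [list(item) for item in data]
--     by_doc = defaultdict(list)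
--     groups = defaultdict(list)
--     for k, item in enumerate(data):
--         by_doc[item[0]].append(k)
--         groups[item[0] + item[3]].append(k)
--     for doc, idxs in by_doc.items():
--         for i, k in enumerate(idxs, 1):
--             out[k][2] = f"{doc}_{i:04}"
--     for key, idxs in groups.items():
--         n = len(idxs)
--         if n > 1:
--             for i, k in enumerate(idxs, 1):
--                 out[k][3] = f"{data[k][3]} {i}/{n}"
--     return out
-- ===== Notes on version B (the rewrite author's own statement) =====
-- stated objective: alternative
-- what changed: B buckets row indices per doc and per doc+title concatenation key into two defaultdict(list) maps built in one pass and then numbers each bucket by enumeration, instead of A's single pass that carries running counter dicts; B builds a fresh output list instead of mutating the rows in place.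
-- outside the precondition, e.g. on add_idx([['d', 'u', 'c']]): A raises IndexError, B raises IndexError
import Mathlib
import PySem

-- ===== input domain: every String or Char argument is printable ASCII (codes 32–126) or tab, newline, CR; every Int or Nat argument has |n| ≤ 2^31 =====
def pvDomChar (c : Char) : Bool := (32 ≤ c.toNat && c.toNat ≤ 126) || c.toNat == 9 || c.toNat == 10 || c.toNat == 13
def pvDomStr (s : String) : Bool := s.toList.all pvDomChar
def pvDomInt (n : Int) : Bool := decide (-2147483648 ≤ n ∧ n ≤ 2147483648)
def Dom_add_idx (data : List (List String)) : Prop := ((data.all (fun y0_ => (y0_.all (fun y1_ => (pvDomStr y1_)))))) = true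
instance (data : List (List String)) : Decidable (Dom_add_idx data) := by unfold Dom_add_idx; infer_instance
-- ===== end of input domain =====

-- B re-groups the rows by doc / doc+title once and numbers each bucket, instead of A's
-- single pass with running counter dicts; B builds a fresh output list where A mutates
-- its argument's rows in place (the equivalence proved here is about the return value).

-- ===== PORT A =====
-- f"{n:04}" for the nonnegative n this program formats (all formatted values are ≥ 1)
def pyFmt04 (n : Int) : String := PySem.Str.zfill (PySem.Int.toStr n) 4
-- item[0] / item[3]; total via the default, Python-exact under Pre_ (row length ≥ 4)
def docOf (item : List String) : String := PySem.List.pyGetD item 0 ""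
def titleOf (item : List String) : String := PySem.List.pyGetD item 3 ""

-- the body of A's second 'for item in data' loop (state: title_index, doc_index, rows so far)
def addIdxStep (title_counts : PySem.Dict String Int)
    (st : PySem.Dict String Int × PySem.Dict String Int × List (List String))
    (item : List String) :
    PySem.Dict String Int × PySem.Dict String Int × List (List String) :=
  let doc_id := docOf item
  let chunk_title := titleOf item
  let dct := doc_id ++ chunk_title
  let tIdx := st.1.modify dct 0 (· + 1)          -- title_index[dct] += 1
  let index := tIdx.getD dct 0
  let total := title_counts.getD dct 0
  let dIdx := st.2.1.modify doc_id 0 (· + 1)     -- doc_index[doc_id] += 1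
  let item1 := PySem.List.pySetD item 2 (doc_id ++ "_" ++ pyFmt04 (dIdx.getD doc_id 0))
  let item2 :=
    if total > 1 then
      PySem.List.pySetD item1 3 (chunk_title ++ " " ++ PySem.Int.toStr index ++ "/" ++ PySem.Int.toStr total)
    else item1
  (tIdx, dIdx, st.2.2 ++ [item2])

def add_idx (data : List (List String)) : List (List String) :=
  let title_counts : PySem.Dict String Int :=
    data.foldl (fun d item => d.modify (docOf item ++ titleOf item) 0 (· + 1)) PySem.Dict.empty
  (data.foldl (addIdxStep title_counts) (PySem.Dict.empty, PySem.Dict.empty, [])).2.2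

-- ===== PORT B =====
-- out[k][c] = g (k, i) applied to row k (Python's 'out[ik[1]][c] = …'; all written k are in range)
def applyAt (g : Nat × Nat → List String → List String)
    (out : List (List String)) (ik : Nat × Nat) : List (List String) :=
  out.modify ik.1 (g ik)

-- 'for i, k in enumerate(idxs, 1): out[k][2] = f"{doc}_{i:04}"'
def altPhase1 (out : List (List String)) (di : String × List Nat) : List (List String) :=
  (di.2.zipIdx 1).foldl
    (applyAt (fun ik row => PySem.List.pySetD row 2 (di.1 ++ "_" ++ pyFmt04 (ik.2 : Int)))) out

-- 'n = len(idxs); if n > 1: for i, k in enumerate(idxs, 1): out[k][3] = f"{data[k][3]} {i}/{n}"'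
def altPhase2 (data : List (List String)) (out : List (List String))
    (gi : String × List Nat) : List (List String) :=
  let n := gi.2.length
  if n > 1 then
    (gi.2.zipIdx 1).foldl
      (applyAt (fun ik row =>
        PySem.List.pySetD row 3
          (titleOf (PySem.List.pyGetD data (ik.1 : Int) []) ++ " " ++
            PySem.Int.toStr (ik.2 : Int) ++ "/" ++ PySem.Int.toStr (n : Int)))) out
  else out

def add_idx_alt (data : List (List String)) : List (List String) :=
  let out0 := data.map (fun item => item)                    -- [list(item) for item in data]
  let dicts := data.zipIdx.foldl
    (fun (st : PySem.Dict String (List Nat) × PySem.Dict String (List Nat)) p =>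
      (st.1.modify (docOf p.1) [] (· ++ [p.2]),
       st.2.modify (docOf p.1 ++ titleOf p.1) [] (· ++ [p.2])))
    (PySem.Dict.empty, PySem.Dict.empty)
  dicts.2.items.foldl (altPhase2 data) (dicts.1.items.foldl altPhase1 out0)

-- ===== PRECONDITION & SPEC =====
-- Pre_ excludes exactly the inputs where the Python A raises IndexError: a row with
-- fewer than 4 columns (item[3] / item[2] is read or assigned on every row).
def Pre_add_idx (data : List (List String)) : Prop := ∀ item ∈ data, 4 ≤ item.length
instance (data : List (List String)) : Decidable (Pre_add_idx data) := by
  unfold Pre_add_idx; infer_instance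

def pvWitness_add_idx : List (List String) :=
  [["d1", "u", "c", "t", "body", "s"], ["d1", "u", "c", "t", "body2", "s"]]

def Spec_add_idx (data : List (List String)) (out : List (List String)) : Prop := out = add_idx_alt data
instance (data : List (List String)) (out : List (List String)) : Decidable (Spec_add_idx data out) := by
  unfold Spec_add_idx; infer_instance

-- ===== CLAIM (what is proved, stated in full; the proofs are below) =====
def Claim_equal_add_idx : Prop := ∀ (data : List (List String)), Dom_add_idx data → Pre_add_idx data → Spec_add_idx data (add_idx data)

-- ===== LEMMAS AND PROOFS =====

def keyOf (item : List String) : String := docOf item ++ titleOf item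

-- the row both programs produce for a row whose doc/title counters are di, ti and whose
-- doc+title total is tc
def mkRow (item : List String) (di ti tc : Nat) : List String :=
  let r1 := PySem.List.pySetD item 2 (docOf item ++ "_" ++ pyFmt04 (di : Int))
  if tc > 1 then
    PySem.List.pySetD r1 3 (titleOf item ++ " " ++ PySem.Int.toStr (ti : Int) ++ "/" ++ PySem.Int.toStr (tc : Int))
  else r1

def emit (data : List (List String)) (j : Nat) : List String :=
  mkRow (data.getD j [])
    (((data.take j).map docOf).count (docOf (data.getD j [])) + 1)
    (((data.take j).map keyOf).count (keyOf (data.getD j [])) + 1)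
    ((data.map keyOf).count (keyOf (data.getD j [])))

-- ---- A-side ----

theorem counter_getD (f : List String → String) (l : List (List String)) (d : PySem.Dict String Int) (c : String) :
    (l.foldl (fun d item => d.modify (f item) 0 (· + 1)) d).getD c 0
      = d.getD c 0 + ((l.map f).count c : Int) := by
  rw [show l.foldl (fun d item => d.modify (f item) 0 (· + 1)) d
        = (l.map f).foldl (fun d x => d.modify x 0 (· + 1)) d
      from (List.foldl_map (f := f)
        (g := fun (d : PySem.Dict String Int) x => d.modify x 0 (· + 1))).symm]
  exact PySem.Dict.getD_foldl_modify_add_one (l.map f) d c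

theorem A_loop (tcd : PySem.Dict String Int) (full : List (List String))
    (hC : ∀ c, tcd.getD c 0 = (((full.map keyOf).count c : Nat) : Int)) :
    ∀ (rest pre : List (List String)) (tI dI : PySem.Dict String Int) (acc : List (List String)),
      pre ++ rest = full →
      (∀ c, tI.getD c 0 = (((pre.map keyOf).count c : Nat) : Int)) →
      (∀ c, dI.getD c 0 = (((pre.map docOf).count c : Nat) : Int)) →
      (rest.foldl (addIdxStep tcd) (tI, dI, acc)).2.2
        = acc ++ (List.range' pre.length rest.length).map (emit full) := by
  intro rest
  induction rest with
  | nil => intro pre tI dI acc _ _ _; simp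
  | cons it rs ih =>
    intro pre tI dI acc hfull hT hD
    have hitem : full.getD pre.length [] = it := by
      rw [← hfull, List.getD_eq_getElem?_getD, List.getElem?_append_right (le_refl _)]; simp
    have htake : full.take pre.length = pre := by
      rw [← hfull]; exact List.take_left
    have hrow : emit full pre.length
        = mkRow it (((pre.map docOf).count (docOf it)) + 1)
            (((pre.map keyOf).count (keyOf it)) + 1)
            ((full.map keyOf).count (keyOf it)) := by
      rw [emit, hitem, htake]
    have hstep : addIdxStep tcd (tI, dI, acc) it
        = (tI.modify (keyOf it) 0 (· + 1), dI.modify (docOf it) 0 (· + 1),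
           acc ++ [emit full pre.length]) := by
      rw [hrow]
      simp only [addIdxStep, mkRow, keyOf, PySem.Dict.getD_modify_self, hT, hD, hC]
      push_cast
      simp only [gt_iff_lt, Nat.one_lt_cast]
    rw [List.foldl_cons, hstep]
    rw [ih (pre ++ [it]) _ _ _ (by simpa using hfull)
      (fun c => by
        rw [PySem.Dict.getD_modify]
        by_cases hc : c = keyOf it
        · simp [hc, hT, List.count_append]
        · simp [hc, hT, List.count_append, Ne.symm hc])
      (fun c => by
        rw [PySem.Dict.getD_modify]
        by_cases hc : c = docOf it
        · simp [hc, hD, List.count_append]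
        · simp [hc, hD, List.count_append, Ne.symm hc])]
    simp [List.range'_succ, List.append_assoc]

theorem A_eq_spec (data : List (List String)) :
    add_idx data = (List.range data.length).map (emit data) := by
  have h := A_loop
    (data.foldl (fun d item => d.modify (docOf item ++ titleOf item) 0 (· + 1)) PySem.Dict.empty)
    data
    (fun c => by
      have h1 := counter_getD (fun item => docOf item ++ titleOf item) data PySem.Dict.empty c
      simpa [show keyOf = fun item => docOf item ++ titleOf item from rfl] using h1)
    data [] PySem.Dict.empty PySem.Dict.empty [] rfl (fun c => by simp) (fun c => by simp)
  simpa [add_idx, List.range_eq_range'] using h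

-- ---- B-side ----

def idxList (f : List String → String) (data : List (List String)) (c : String) : List Nat :=
  ((data.zipIdx.map (fun p => (f p.1, p.2))).filter (fun q => q.1 == c)).map (·.2)

theorem inner_len (g : Nat × Nat → List String → List String) :
    ∀ (l : List Nat) (off : Nat) (out : List (List String)),
      ((l.zipIdx off).foldl (applyAt g) out).length = out.length := by
  intro l
  induction l with
  | nil => intro off out; rfl
  | cons a t ih =>
    intro off out
    rw [List.zipIdx_cons, List.foldl_cons, ih]
    simp [applyAt]

theorem inner_nomem (g : Nat × Nat → List String → List String) :
    ∀ (l : List Nat) (off : Nat) (out : List (List String)) (j : Nat), j ∉ l →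
      ((l.zipIdx off).foldl (applyAt g) out)[j]? = out[j]? := by
  intro l
  induction l with
  | nil => intro off out j _; rfl
  | cons a t ih =>
    intro off out j hj
    rw [List.zipIdx_cons, List.foldl_cons, ih _ _ _ (fun h => hj (List.mem_cons_of_mem _ h))]
    simp only [applyAt, List.getElem?_modify]
    have : a ≠ j := fun h => hj (h ▸ List.mem_cons_self)
    simp [this]

theorem inner_once (g : Nat × Nat → List String → List String)
    (l1 l2 : List Nat) (j off : Nat) (out : List (List String))
    (h1 : j ∉ l1) (h2 : j ∉ l2) :
    (((l1 ++ j :: l2).zipIdx off).foldl (applyAt g) out)[j]?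
      = (out[j]?).map (g (j, off + l1.length)) := by
  rw [List.zipIdx_append, List.foldl_append, List.zipIdx_cons, List.foldl_cons]
  rw [inner_nomem g _ _ _ _ h2]
  simp only [applyAt, List.getElem?_modify]
  rw [inner_nomem g _ _ _ _ h1]
  cases out[j]? <;> simp

theorem keys_skip {F : List (List String) → String → List (List String)} {j : Nat} :
    ∀ (K : List String),
    (∀ c ∈ K, ∀ out, (F out c)[j]? = out[j]?) →
    ∀ out, ((K.foldl F out))[j]? = out[j]? := by
  intro K
  induction K with
  | nil => intro _ out; rfl
  | cons a t ih =>
    intro hK out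
    rw [List.foldl_cons, ih (fun c hc => hK c (List.mem_cons_of_mem _ hc)),
        hK a List.mem_cons_self]

theorem keys_fold {F : List (List String) → String → List (List String)} {j : Nat}
    (K1 K2 : List String) (cstar : String) (G : List String → List String)
    (hK1 : ∀ c ∈ K1, ∀ out, (F out c)[j]? = out[j]?)
    (hK2 : ∀ c ∈ K2, ∀ out, (F out c)[j]? = out[j]?)
    (hhit : ∀ out, (F out cstar)[j]? = (out[j]?).map G) :
    ∀ out, (((K1 ++ cstar :: K2).foldl F out))[j]? = (out[j]?).map G := by
  intro out
  rw [List.foldl_append, List.foldl_cons, keys_skip K2 hK2, hhit, keys_skip K1 hK1]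


theorem idxList_eq (f : List String → String) (data : List (List String)) (c : String) :
    idxList f data c = (data.zipIdx.filter (fun p => f p.1 == c)).map (·.2) := by
  unfold idxList
  rw [List.filter_map, List.map_map]
  rfl

theorem zipIdx_countP (f : List String → String) (c : String) :
    ∀ (l : List (List String)) (m : Nat),
      ((l.zipIdx m).filter (fun p => f p.1 == c)).length = (l.map f).count c := by
  intro l
  induction l with
  | nil => intro m; simp
  | cons a t ih =>
    intro m
    rw [List.zipIdx_cons, List.filter_cons]
    by_cases h : f a = c
    · simp [h, ih]
    · simp [h, ih]

theorem idxList_length (f : List String → String) (data : List (List String)) (c : String) :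
    (idxList f data c).length = (data.map f).count c := by
  rw [idxList_eq, List.length_map, zipIdx_countP]

theorem idxList_mem (f : List String → String) (data : List (List String)) (c : String) (j : Nat)
    (h : j ∈ idxList f data c) : j < data.length ∧ f (data.getD j []) = c := by
  rw [idxList_eq] at h
  obtain ⟨p, hp, hpj⟩ := List.mem_map.mp h
  obtain ⟨hz, hf⟩ := List.mem_filter.mp hp
  obtain ⟨-, hlt, hx⟩ := List.mem_zipIdx hz
  subst hpj
  have hjlt : p.2 < data.length := by simpa using hlt
  refine ⟨hjlt, ?_⟩
  rw [List.getD_eq_getElem data [] hjlt]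
  have hx' : p.1 = data[p.2] := by simpa using hx
  rw [← hx']
  exact eq_of_beq hf

theorem idxList_decomp (f : List String → String) (data : List (List String)) (j : Nat)
    (hj : j < data.length) :
    ∃ l1 l2, idxList f data (f data[j]) = l1 ++ j :: l2 ∧ j ∉ l1 ∧ j ∉ l2 ∧
      l1.length = ((data.take j).map f).count (f data[j]) := by
  refine ⟨((data.take j).zipIdx.filter (fun p => f p.1 == f data[j])).map (·.2),
          (((data.drop (j+1)).zipIdx (j+1)).filter (fun p => f p.1 == f data[j])).map (·.2),
          ?_, ?_, ?_, ?_⟩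
  · rw [idxList_eq]
    have hsplit : data = data.take j ++ data[j] :: data.drop (j+1) := by
      conv_lhs => rw [← List.take_append_drop j data]
      rw [List.getElem_cons_drop hj]
    have hlen : (data.take j).length = j := by
      simp [List.length_take, Nat.min_eq_left (Nat.le_of_lt hj)]
    have hzip : data.zipIdx
        = (data.take j).zipIdx ++ ((data[j], j) :: (data.drop (j+1)).zipIdx (j+1)) := by
      conv_lhs => rw [hsplit]
      rw [List.zipIdx_append, List.zipIdx_cons, hlen]
      norm_num
    rw [hzip, List.filter_append, List.filter_cons]
    simp only [beq_self_eq_true, if_pos]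
    rw [List.map_append]
    simp
  · intro hmem
    obtain ⟨p, hp, hpj⟩ := List.mem_map.mp hmem
    obtain ⟨hz, -⟩ := List.mem_filter.mp hp
    obtain ⟨-, hlt, -⟩ := List.mem_zipIdx hz
    have hlen : (data.take j).length = j := by
      simp [List.length_take, Nat.min_eq_left (Nat.le_of_lt hj)]
    rw [hlen] at hlt
    omega
  · intro hmem
    obtain ⟨p, hp, hpj⟩ := List.mem_map.mp hmem
    obtain ⟨hz, -⟩ := List.mem_filter.mp hp
    obtain ⟨hge, -, -⟩ := List.mem_zipIdx hz
    omega
  · rw [List.length_map, zipIdx_countP]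

theorem phase1_len : ∀ (items : List (String × List Nat)) (out : List (List String)),
    (items.foldl altPhase1 out).length = out.length := by
  intro items
  induction items with
  | nil => intro out; rfl
  | cons a t ih =>
    intro out
    rw [List.foldl_cons, ih]
    exact inner_len _ _ _ _

theorem phase2_len (data : List (List String)) :
    ∀ (items : List (String × List Nat)) (out : List (List String)),
      (items.foldl (altPhase2 data) out).length = out.length := by
  intro items
  induction items with
  | nil => intro out; rfl
  | cons a t ih =>
    intro out
    rw [List.foldl_cons, ih]
    by_cases h : a.2.length > 1
    · simp only [altPhase2, if_pos h]
      exact inner_len _ _ _ _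
    · simp only [altPhase2, if_neg h]


theorem Df_dict_eq (fn : List String → String) (data : List (List String)) :
    data.zipIdx.foldl
        (fun (d : PySem.Dict String (List Nat)) p => d.modify (fn p.1) [] (· ++ [p.2]))
        PySem.Dict.empty
      = (data.zipIdx.map (fun p => (fn p.1, p.2))).foldl
          (fun d q => d.modify q.1 [] (· ++ [q.2])) PySem.Dict.empty :=
  (List.foldl_map (f := fun (p : List String × Nat) => (fn p.1, p.2))
    (g := fun (d : PySem.Dict String (List Nat)) q => d.modify q.1 [] (· ++ [q.2]))).symm

theorem Df_getD (fn : List String → String) (data : List (List String)) (c : String) :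
    (data.zipIdx.foldl
        (fun (d : PySem.Dict String (List Nat)) p => d.modify (fn p.1) [] (· ++ [p.2]))
        PySem.Dict.empty).getD c []
      = idxList fn data c := by
  rw [Df_dict_eq, PySem.Dict.getD_foldl_modify_append]
  simp [idxList]

theorem Df_keys (fn : List String → String) (data : List (List String)) :
    (data.zipIdx.foldl
        (fun (d : PySem.Dict String (List Nat)) p => d.modify (fn p.1) [] (· ++ [p.2]))
        PySem.Dict.empty).keys
      = PySem.Set.ofList (data.map fn) := by
  rw [PySem.Dict.keys_foldl_modify_key (l := data.zipIdx) (key := fun p => fn p.1)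
      (d0 := ([] : List Nat)) (f := fun _ p v => v ++ [p.2]),
    PySem.Dict.keys_empty, PySem.Set.update_nil_left]
  congr 1
  have h1 : data.zipIdx.map (fun p => fn p.1) = (data.zipIdx.map Prod.fst).map fn := by
    rw [List.map_map]; rfl
  rw [h1, List.zipIdx_map_fst]

theorem Df_items (fn : List String → String) (data : List (List String)) :
    (data.zipIdx.foldl
        (fun (d : PySem.Dict String (List Nat)) p => d.modify (fn p.1) [] (· ++ [p.2]))
        PySem.Dict.empty).items
      = (PySem.Set.ofList (data.map fn)).map (fun c => (c, idxList fn data c)) := by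
  have hnd : (data.zipIdx.foldl
      (fun (d : PySem.Dict String (List Nat)) p => d.modify (fn p.1) [] (· ++ [p.2]))
      PySem.Dict.empty).keys.Nodup := by
    rw [Df_keys]; exact PySem.Set.nodup_ofList _
  rw [PySem.Dict.items_eq_map_keys _ hnd ([] : List Nat), Df_keys]
  refine List.map_congr_left ?_
  intro c _
  rw [Df_getD]

set_option maxHeartbeats 1000000 in
theorem phase1_at (data : List (List String)) (j : Nat) (hj : j < data.length)
    (out : List (List String)) :
    (((PySem.Set.ofList (data.map docOf)).map (fun c => (c, idxList docOf data c))).foldl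
        altPhase1 out)[j]?
      = out[j]?.map (fun row => PySem.List.pySetD row 2
          (docOf data[j] ++ "_" ++
            pyFmt04 ((((data.take j).map docOf).count (docOf data[j]) + 1 : Nat) : Int))) := by
  obtain ⟨l1, l2, hdec, hn1, hn2, hl1⟩ := idxList_decomp docOf data j hj
  have hmem : docOf data[j] ∈ PySem.Set.ofList (data.map docOf) := by
    rw [PySem.Set.mem_ofList]
    exact List.mem_map_of_mem (List.getElem_mem hj)
  obtain ⟨K1, K2, hK⟩ := List.append_of_mem hmem
  have hnd : (PySem.Set.ofList (data.map docOf)).Nodup := PySem.Set.nodup_ofList _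
  rw [hK] at hnd
  have hc1 : docOf data[j] ∉ K1 := fun h =>
    (List.disjoint_of_nodup_append hnd) h List.mem_cons_self
  have hc2 : docOf data[j] ∉ K2 :=
    (List.nodup_cons.mp (List.nodup_append.mp hnd).2.1).1
  rw [← hl1, Nat.add_comm l1.length 1]
  rw [hK]
  rw [show ((K1 ++ docOf data[j] :: K2).map (fun c => (c, idxList docOf data c))).foldl
        altPhase1 out
      = (K1 ++ docOf data[j] :: K2).foldl
          (fun out c => altPhase1 out (c, idxList docOf data c)) out
    from List.foldl_map]
  have hres := keys_fold (F := fun out c => altPhase1 out (c, idxList docOf data c)) (j := j)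
    K1 K2 (docOf data[j])
    (fun row => PySem.List.pySetD row 2
      (docOf data[j] ++ "_" ++ pyFmt04 (((1 + l1.length : Nat) : Nat) : Int)))
    (fun c hc out' => by
      have hne : c ≠ docOf data[j] := fun he => hc1 (he ▸ hc)
      have hnm : j ∉ idxList docOf data c := fun hm => by
        have h2 := (idxList_mem _ _ _ _ hm).2
        rw [List.getD_eq_getElem data [] hj] at h2
        exact hne h2.symm
      exact inner_nomem _ _ _ _ _ hnm)
    (fun c hc out' => by
      have hne : c ≠ docOf data[j] := fun he => hc2 (he ▸ hc)
      have hnm : j ∉ idxList docOf data c := fun hm => by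
        have h2 := (idxList_mem _ _ _ _ hm).2
        rw [List.getD_eq_getElem data [] hj] at h2
        exact hne h2.symm
      exact inner_nomem _ _ _ _ _ hnm)
    (fun out' => by
      show (altPhase1 out' (docOf data[j], idxList docOf data (docOf data[j])))[j]? = _
      rw [hdec]
      simp only [altPhase1]
      rw [inner_once _ l1 l2 j 1 out' hn1 hn2])
  exact hres out

set_option maxHeartbeats 1000000 in
theorem phase2_at (data : List (List String)) (j : Nat) (hj : j < data.length)
    (out : List (List String)) :
    (((PySem.Set.ofList (data.map keyOf)).map (fun c => (c, idxList keyOf data c))).foldl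
        (altPhase2 data) out)[j]?
      = if (data.map keyOf).count (keyOf data[j]) > 1 then
          out[j]?.map (fun row => PySem.List.pySetD row 3
            (titleOf data[j] ++ " " ++
              PySem.Int.toStr (((((data.take j).map keyOf).count (keyOf data[j]) + 1 : Nat)) : Int)
              ++ "/" ++ PySem.Int.toStr (((data.map keyOf).count (keyOf data[j]) : Nat) : Int)))
        else out[j]? := by
  have hgetd : keyOf (data.getD j []) = keyOf data[j] := by
    rw [List.getD_eq_getElem data [] hj]
  by_cases htc : (data.map keyOf).count (keyOf data[j]) > 1
  · rw [if_pos htc]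
    obtain ⟨l1, l2, hdec, hn1, hn2, hl1⟩ := idxList_decomp keyOf data j hj
    have hlen2 : (l1 ++ j :: l2).length = (data.map keyOf).count (keyOf data[j]) := by
      rw [← hdec, idxList_length]
    have hmem : keyOf data[j] ∈ PySem.Set.ofList (data.map keyOf) := by
      rw [PySem.Set.mem_ofList]
      exact List.mem_map_of_mem (List.getElem_mem hj)
    obtain ⟨K1, K2, hK⟩ := List.append_of_mem hmem
    have hnd : (PySem.Set.ofList (data.map keyOf)).Nodup := PySem.Set.nodup_ofList _
    rw [hK] at hnd
    have hc1 : keyOf data[j] ∉ K1 := fun h =>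
      (List.disjoint_of_nodup_append hnd) h List.mem_cons_self
    have hc2 : keyOf data[j] ∉ K2 :=
      (List.nodup_cons.mp (List.nodup_append.mp hnd).2.1).1
    rw [← hl1, Nat.add_comm l1.length 1, ← hlen2]
    rw [hK]
    rw [show ((K1 ++ keyOf data[j] :: K2).map (fun c => (c, idxList keyOf data c))).foldl
          (altPhase2 data) out
        = (K1 ++ keyOf data[j] :: K2).foldl
            (fun out c => altPhase2 data out (c, idxList keyOf data c)) out
      from List.foldl_map]
    have hres := keys_fold (F := fun out c => altPhase2 data out (c, idxList keyOf data c)) (j := j)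
      K1 K2 (keyOf data[j])
      (fun row => PySem.List.pySetD row 3
        (titleOf (PySem.List.pyGetD data (j : Int) []) ++ " " ++
          PySem.Int.toStr ((1 + l1.length : Nat) : Int) ++ "/" ++
          PySem.Int.toStr (((l1 ++ j :: l2).length : Nat) : Int)))
      (fun c hc out' => by
        have hne : c ≠ keyOf data[j] := fun he => hc1 (he ▸ hc)
        have hnm : j ∉ idxList keyOf data c := fun hm => by
          have h2 := (idxList_mem _ _ _ _ hm).2
          rw [List.getD_eq_getElem data [] hj] at h2
          exact hne h2.symm
        show (altPhase2 data out' (c, idxList keyOf data c))[j]? = _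
        simp only [altPhase2]
        split
        · exact inner_nomem _ _ _ _ _ hnm
        · rfl)
      (fun c hc out' => by
        have hne : c ≠ keyOf data[j] := fun he => hc2 (he ▸ hc)
        have hnm : j ∉ idxList keyOf data c := fun hm => by
          have h2 := (idxList_mem _ _ _ _ hm).2
          rw [List.getD_eq_getElem data [] hj] at h2
          exact hne h2.symm
        show (altPhase2 data out' (c, idxList keyOf data c))[j]? = _
        simp only [altPhase2]
        split
        · exact inner_nomem _ _ _ _ _ hnm
        · rfl)
      (fun out' => by
        show (altPhase2 data out' (keyOf data[j], idxList keyOf data (keyOf data[j])))[j]? = _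
        rw [hdec]
        simp only [altPhase2]
        rw [if_pos (by rw [hlen2]; exact htc)]
        rw [inner_once _ l1 l2 j 1 out' hn1 hn2])
    rw [hres out]
    have hpg : PySem.List.pyGetD data (j : Int) [] = data[j] := by
      simp only [PySem.List.pyGetD_natCast, List.getD_eq_getElem?_getD,
        List.getElem?_eq_getElem hj, Option.getD_some]
    rw [hpg]
  · rw [if_neg htc]
    rw [show ((PySem.Set.ofList (data.map keyOf)).map (fun c => (c, idxList keyOf data c))).foldl
          (altPhase2 data) out
        = (PySem.Set.ofList (data.map keyOf)).foldl
            (fun out c => altPhase2 data out (c, idxList keyOf data c)) out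
      from List.foldl_map]
    refine keys_skip _ ?_ out
    intro c hc out'
    show (altPhase2 data out' (c, idxList keyOf data c))[j]? = _
    by_cases he : c = keyOf data[j]
    · subst he
      simp only [altPhase2]
      rw [if_neg (by rw [idxList_length]; exact htc)]
    · have hnm : j ∉ idxList keyOf data c := fun hm => by
        have h2 := (idxList_mem _ _ _ _ hm).2
        rw [List.getD_eq_getElem data [] hj] at h2
        exact he h2.symm
      simp only [altPhase2]
      split
      · exact inner_nomem _ _ _ _ _ hnm
      · rfl

theorem B_eq_spec (data : List (List String)) :
    add_idx_alt data = (List.range data.length).map (emit data) := by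
  have hsplit := PySem.List.foldl_prod_mk
      (f := fun (d : PySem.Dict String (List Nat)) (p : List String × Nat) =>
        d.modify (docOf p.1) [] (· ++ [p.2]))
      (g := fun (d : PySem.Dict String (List Nat)) (p : List String × Nat) =>
        d.modify (docOf p.1 ++ titleOf p.1) [] (· ++ [p.2]))
      data.zipIdx PySem.Dict.empty PySem.Dict.empty
  have hid : data.map (fun item => item) = data := by simp
  simp only [add_idx_alt, hid, hsplit]
  rw [Df_items docOf data]
  rw [show (data.zipIdx.foldl
        (fun (d : PySem.Dict String (List Nat)) p =>
          d.modify (docOf p.1 ++ titleOf p.1) [] (· ++ [p.2])) PySem.Dict.empty).items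
      = (PySem.Set.ofList (data.map keyOf)).map (fun c => (c, idxList keyOf data c))
    from Df_items (fun item => docOf item ++ titleOf item) data]
  apply List.ext_getElem?
  intro j
  by_cases hj : j < data.length
  · rw [phase2_at data j hj, phase1_at data j hj]
    rw [List.getElem?_map, List.getElem?_range hj, List.getElem?_eq_getElem hj]
    simp only [Option.map_some]
    unfold emit mkRow
    rw [List.getD_eq_getElem data [] hj]
    by_cases htc : (data.map keyOf).count (keyOf data[j]) > 1
    · rw [if_pos htc, if_pos htc]
    · rw [if_neg htc, if_neg htc]
  · have h1 : data.length ≤ j := Nat.le_of_not_lt hj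
    have hlen : ((((PySem.Set.ofList (data.map keyOf)).map
          (fun c => (c, idxList keyOf data c))).foldl (altPhase2 data)
            (((PySem.Set.ofList (data.map docOf)).map
              (fun c => (c, idxList docOf data c))).foldl altPhase1 data))).length
        = data.length := by
      rw [phase2_len, phase1_len]
    rw [List.getElem?_eq_none (by rw [hlen]; exact h1),
        List.getElem?_eq_none (by rw [List.length_map, List.length_range]; exact h1)]

-- ===== VERDICT (by name: the statement is the Claim_ definition above) =====
theorem add_idx_spec : Claim_equal_add_idx := by
  intro data _ _
  unfold Spec_add_idx
  rw [A_eq_spec, B_eq_spec]
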